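-- pv_equiv track=rewrite | github.com/31788517-ctyqq/sport-lottery-sweeper | frontend/fix-tests.py | add_pinia_mocks
-- ===== SOURCE A (Python) =====
-- def add_pinia_mocks(content):
--     """添加缺失的 Pinia store 模拟"""
--     # 检查是否使用了 useAppStore 或 useUserStore
--     if 'useAppStore' in content or 'useUserStore' in content:
--         # 检查是否已经有模拟
--         if "vi.mock('@/stores" not in content:
--             # 在文件顶部添加模拟
--             lines = content.split('\n')
--             new_lines = []
--             added_mock = False
--
--             for i, line in enumerate(lines):
--                 new_lines.append(line)
--                 if line.strip().startswith('import') and not added_mock: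
--                     # 在导入语句后添加模拟
--                     # 找到导入块的结束
--                     j = i + 1
--                     while j < len(lines) and (lines[j].strip().startswith('import') or lines[j].strip() == ''):
--                         j += 1
--                     # 在 j 处插入模拟
--                     mock_code = """
-- // 模拟 Pinia stores
-- vi.mock('@/stores/app', () => ({
--   useAppStore: () => ({
--     showLoginModal: false,
--     setShowLoginModal: vi.fn(),
--     user: null,
--     isLoggedIn: false,
--     currentView: 'home',
--     setCurrentView: vi.fn(),
--     theme: 'light'
--   })
-- }))
--
-- vi.mock('@/stores/user', () => ({
--   useUserStore: () => ({
--     isLoggedIn: true,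
--     user: { username: 'testuser', nickname: 'Test User' },
--     logout: vi.fn(),
--     login: vi.fn()
--   })
-- }))"""
--                     new_lines.append(mock_code)
--                     added_mock = True
--
--             content = '\n'.join(new_lines)
--
--     return content
-- ===== SOURCE B (Python) =====
-- MOCK_CODE = """
-- // 模拟 Pinia stores
-- vi.mock('@/stores/app', () => ({
--   useAppStore: () => ({
--     showLoginModal: false,
--     setShowLoginModal: vi.fn(),
--     user: null,
--     isLoggedIn: false,
--     currentView: 'home',
--     setCurrentView: vi.fn(),
--     theme: 'light'
--   })
-- }))
--
-- vi.mock('@/stores/user', () => ({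
--   useUserStore: () => ({
--     isLoggedIn: true,
--     user: { username: 'testuser', nickname: 'Test User' },
--     logout: vi.fn(),
--     login: vi.fn()
--   })
-- }))"""
--
--
-- def _first_import_line_end(s):
--     """Index just past the first line whose stripped text starts with 'import',
--     scanning the raw string line by line via find('\\n'); None if no such line."""
--     offset = 0
--     while True:
--         nl = s.find('\n')
--         end = len(s) if nl == -1 else nl
--         if s[:end].strip().startswith('import'):
--             return offset + end
--         if nl == -1:
--             return None
--         offset += nl + 1
--         s = s[nl + 1:]
--
--
-- def add_pinia_mocks(content):
--     """添加缺失的 Pinia store 模拟"""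
--     if (('useAppStore' in content or 'useUserStore' in content)
--             and "vi.mock('@/stores" not in content):
--         end = _first_import_line_end(content)
--         if end is not None:
--             return content[:end] + '\n' + MOCK_CODE + content[end:]
--     return content
-- ===== Notes on version B (the rewrite author's own statement) =====
-- stated objective: alternative
-- what changed: B never builds a list of lines: it scans the raw string with str.find for the next newline to locate the end position of the first import line and splices the mock block in by substring concatenation, instead of A's split-into-lines, flag-carrying rebuild loop (with its dead inner while-scan) and join.
import Mathlib
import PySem

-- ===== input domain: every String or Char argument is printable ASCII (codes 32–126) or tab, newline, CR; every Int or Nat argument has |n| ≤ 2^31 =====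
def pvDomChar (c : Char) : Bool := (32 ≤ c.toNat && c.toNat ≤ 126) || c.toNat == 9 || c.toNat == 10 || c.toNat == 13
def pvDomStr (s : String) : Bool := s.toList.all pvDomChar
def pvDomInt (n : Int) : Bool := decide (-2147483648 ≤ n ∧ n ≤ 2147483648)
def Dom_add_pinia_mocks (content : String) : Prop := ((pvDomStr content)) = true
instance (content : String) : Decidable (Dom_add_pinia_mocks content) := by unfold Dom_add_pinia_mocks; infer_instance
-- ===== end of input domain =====

-- B never builds a list of lines: it scans the raw string with find('\n') for the end
-- position of the first import line and splices the mock block in by substring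
-- concatenation, instead of A's split/rebuild-loop/join (objective: alternative).

-- the mock_code string literal both versions insert
def pvMockChars : List Char := String.toList "\n// 模拟 Pinia stores\nvi.mock('@/stores/app', () => ({\n  useAppStore: () => ({\n    showLoginModal: false,\n    setShowLoginModal: vi.fn(),\n    user: null,\n    isLoggedIn: false,\n    currentView: 'home',\n    setCurrentView: vi.fn(),\n    theme: 'light'\n  })\n}))\n\nvi.mock('@/stores/user', () => ({\n  useUserStore: () => ({\n    isLoggedIn: true,\n    user: { username: 'testuser', nickname: 'Test User' },\n    logout: vi.fn(),\n    login: vi.fn()\n  })\n}))"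

-- the `line.strip().startswith('import')` test both versions perform
def pvIsImport (l : List Char) : Bool :=
  PySem.Chars.startswith (PySem.Chars.strip l) (String.toList "import")

-- ===== PORT A =====
-- A's inner `while j < len(lines) and …: j += 1` (its result j is never used; ported step for step)
def pvJScan (lines : List (List Char)) (j : Int) : Int :=
  if h : j < (lines.length : Int) then
    let lj := (PySem.List.pyGet? lines j).getD []
    if PySem.Chars.startswith (PySem.Chars.strip lj) (String.toList "import")
        || PySem.Chars.strip lj == [] then
      pvJScan lines (j + 1)
    else j
  else j
termination_by ((lines.length : Int) - j).toNat
decreasing_by omega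

-- the body of A's `for i, line in enumerate(lines)` loop; state = (new_lines, added_mock)
def pvBodyA (lines : List (List Char)) (st : List (List Char) × Bool) (p : Int × List Char) :
    List (List Char) × Bool :=
  let new_lines := st.1 ++ [p.2]
  if pvIsImport p.2 && !st.2 then
    let _j := pvJScan lines (p.1 + 1)   -- computed by A, never used
    (new_lines ++ [pvMockChars], true)
  else (new_lines, st.2)

def add_pinia_mocks (content : String) : String :=
  if PySem.Str.isIn "useAppStore" content || PySem.Str.isIn "useUserStore" content then
    if !PySem.Str.isIn "vi.mock('@/stores" content then
      let lines := PySem.Chars.splitOn content.toList (String.toList "\n")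
      let res := (PySem.List.enumerate lines 0).foldl (pvBodyA lines) ([], false)
      String.ofList (PySem.Chars.join (String.toList "\n") res.1)
    else content
  else content

-- ===== PORT B =====
-- B's `_first_import_line_end` loop: `s.find('\n')`, test `s[:end]`, loop on `s[nl+1:]`
def pvScanB (s : List Char) (offset : Nat) : Option Nat :=
  let nl := PySem.Chars.find s ['\n']
  if hnl : nl = -1 then
    if pvIsImport s then some (offset + s.length) else none
  else
    let e := nl.toNat
    if pvIsImport (s.take e) then some (offset + e)
    else pvScanB (s.drop (e + 1)) (offset + e + 1)
termination_by s.length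
decreasing_by
  have h0 : 0 ≤ nl := by
    have := PySem.Chars.neg_one_le_find (s := s) (sub := ['\n'])
    omega
  have hpre := (PySem.Chars.find_spec (s := s) (sub := ['\n']) h0).1
  have hlt : nl.toNat < s.length := by
    by_contra hge
    have hnil : s.drop nl.toNat = [] := List.drop_eq_nil_of_le (by omega)
    rw [hnil] at hpre
    exact absurd (List.prefix_nil.mp hpre) (by simp)
  simp only [List.length_drop]
  omega

def add_pinia_mocks_alt (content : String) : String :=
  if (PySem.Str.isIn "useAppStore" content || PySem.Str.isIn "useUserStore" content)
      && !PySem.Str.isIn "vi.mock('@/stores" content then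
    match pvScanB content.toList 0 with
    | none => content
    | some e =>
        String.ofList (content.toList.take e ++ '\n' :: (pvMockChars ++ content.toList.drop e))
  else content

-- ===== PRECONDITION & SPEC =====
def Spec_add_pinia_mocks (content : String) (out : String) : Prop := out = add_pinia_mocks_alt content
instance (content : String) (out : String) : Decidable (Spec_add_pinia_mocks content out) := by unfold Spec_add_pinia_mocks; infer_instance

-- ===== CLAIM (what is proved, stated in full; the proofs are below) =====
def Claim_equal_add_pinia_mocks : Prop := ∀ (content : String), Dom_add_pinia_mocks content → Spec_add_pinia_mocks content (add_pinia_mocks content)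

-- ===== LEMMAS AND PROOFS =====

-- [c] is a prefix of s.drop i exactly when s[i] = c
lemma singleton_prefix_drop (s : List Char) (c : Char) (i : Nat) :
    [c] <+: s.drop i ↔ ∃ h : i < s.length, s[i] = c := by
  constructor
  · rintro ⟨t, ht⟩
    have hlt : i < s.length := by
      by_contra hge
      rw [List.drop_eq_nil_of_le (by omega)] at ht
      simp at ht
    refine ⟨hlt, ?_⟩
    rw [List.drop_eq_getElem_cons hlt] at ht
    simp only [List.cons_append, List.nil_append, List.cons.injEq] at ht
    exact ht.1.symm
  · rintro ⟨h, hc⟩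
    rw [List.drop_eq_getElem_cons h, hc]
    exact ⟨_, rfl⟩

-- Python's s.find('\n') against the structural first-index view
lemma find_newline_eq (s : List Char) :
    PySem.Chars.find s ['\n'] =
      match s.findIdx? (fun c => c == '\n') with
      | none => -1
      | some k => (k : Int) := by
  cases h : s.findIdx? (fun c => c == '\n') with
  | none =>
      refine (PySem.Chars.find_eq_neg_one_iff s ['\n']).mpr ?_
      intro hinf
      have hmem : '\n' ∈ s := hinf.subset (by simp)
      have := List.findIdx?_eq_none_iff.mp h '\n' hmem
      simp at this
  | some k =>
      obtain ⟨hlt, hc, hmin⟩ := List.findIdx?_eq_some_iff_getElem.mp h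
      have hc' : s[k] = '\n' := by simpa using hc
      have hpk : ['\n'] <+: s.drop k := (singleton_prefix_drop s '\n' k).mpr ⟨hlt, hc'⟩
      have h0 : 0 ≤ PySem.Chars.find s ['\n'] := by
        refine (PySem.Chars.find_nonneg_iff s ['\n']).mpr ?_
        have := (PySem.Chars.exists_prefix_drop_iff_isIn ['\n'] s).mp ⟨k, hpk⟩
        exact (PySem.Chars.isIn_iff_infix ['\n'] s).mp this
      obtain ⟨hpf, hminf⟩ := PySem.Chars.find_spec (s := s) (sub := ['\n']) h0
      have hfk : (PySem.Chars.find s ['\n']).toNat = k := by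
        rcases lt_trichotomy (PySem.Chars.find s ['\n']).toNat k with hlt' | heq | hgt
        · obtain ⟨hl2, hc2⟩ := (singleton_prefix_drop s '\n' _).mp hpf
          have := hmin _ hlt'
          simp [hc2] at this
        · exact heq
        · exact absurd hpk (hminf k hgt)
      show PySem.Chars.find s ['\n'] = (k : Int)
      omega

lemma find_newline_lt (s : List Char) (k : Nat)
    (h : s.findIdx? (fun c => c == '\n') = some k) : k < s.length :=
  (List.findIdx?_eq_some_iff_getElem.mp h).1

lemma getElem_of_findIdx_newline (s : List Char) (k : Nat)
    (h : s.findIdx? (fun c => c == '\n') = some k) (hk : k < s.length) : s[k] = '\n' := by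
  have := (List.findIdx?_eq_some_iff_getElem.mp h).2.1
  simpa using this

-- proof-side view of content.split('\n'): peel off one line at the first '\n'
def linesOf (s : List Char) : List (List Char) :=
  match h : s.findIdx? (fun c => c == '\n') with
  | none => [s]
  | some e => s.take e :: linesOf (s.drop (e + 1))
termination_by s.length
decreasing_by
  have := find_newline_lt s e h
  simp only [List.length_drop]
  omega

lemma linesOf_none (s : List Char) (h : s.findIdx? (fun c => c == '\n') = none) :
    linesOf s = [s] := by
  rw [linesOf]
  split
  · rfl
  · rename_i e heq; rw [h] at heq; cases heq

lemma linesOf_some (s : List Char) (e : Nat) (h : s.findIdx? (fun c => c == '\n') = some e) :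
    linesOf s = s.take e :: linesOf (s.drop (e + 1)) := by
  rw [linesOf]
  split
  · rename_i heq; rw [h] at heq; cases heq
  · rename_i e' heq
    rw [h] at heq
    injection heq with he
    subst he
    rfl

def mapHead (f : List Char → List Char) : List (List Char) → List (List Char)
  | [] => []
  | x :: xs => f x :: xs

lemma linesOf_ne_nil (s : List Char) : linesOf s ≠ [] := by
  cases h : s.findIdx? (fun c => c == '\n') with
  | none => rw [linesOf_none s h]; simp
  | some e => rw [linesOf_some s e h]; simp

lemma exists_cons_linesOf (s : List Char) :
    ∃ t ts, linesOf s = t :: ts := by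
  cases hL : linesOf s with
  | nil => exact absurd hL (linesOf_ne_nil _)
  | cons t ts => exact ⟨t, ts, rfl⟩

lemma join_cons_ne_nil (a : List Char) (X : List (List Char)) (h : X ≠ []) :
    PySem.Chars.join ['\n'] (a :: X) = a ++ '\n' :: PySem.Chars.join ['\n'] X := by
  cases X with
  | nil => exact absurd rfl h
  | cons x xs => rw [PySem.Chars.join_cons_cons]; simp

lemma linesOf_cons (c : Char) (rest : List Char) :
    linesOf (c :: rest) =
      if c = '\n' then [] :: linesOf rest else mapHead (c :: ·) (linesOf rest) := by
  by_cases hc : c = '\n'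
  · have h : (c :: rest).findIdx? (fun c => c == '\n') = some 0 := by
      rw [List.findIdx?_cons]; simp [hc]
    rw [linesOf_some _ 0 h]
    simp [hc]
  · rw [if_neg hc]
    cases h : rest.findIdx? (fun c => c == '\n') with
    | none =>
        have h' : (c :: rest).findIdx? (fun c => c == '\n') = none := by
          rw [List.findIdx?_cons]; simp [hc, h]
        rw [linesOf_none _ h', linesOf_none _ h]
        simp [mapHead]
    | some e =>
        have h' : (c :: rest).findIdx? (fun c => c == '\n') = some (e + 1) := by
          rw [List.findIdx?_cons]; simp [hc, h]
        rw [linesOf_some _ _ h', linesOf_some _ _ h]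
        simp [mapHead, List.take_succ_cons, List.drop_succ_cons]

lemma join_linesOf (s : List Char) :
    PySem.Chars.join ['\n'] (linesOf s) = s := by
  cases h : s.findIdx? (fun c => c == '\n') with
  | none => rw [linesOf_none s h, PySem.Chars.join_singleton]
  | some e =>
      have hlt := find_newline_lt s e h
      have hc' := getElem_of_findIdx_newline s e h hlt
      have ihtail := join_linesOf (s.drop (e + 1))
      rw [linesOf_some s e h, join_cons_ne_nil _ _ (linesOf_ne_nil _), ihtail]
      conv_rhs => rw [← List.take_append_drop e s, List.drop_eq_getElem_cons hlt, hc']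
termination_by s.length
decreasing_by
  have := find_newline_lt s e h
  simp only [List.length_drop]
  omega

-- splitOn's fuelled worker produces exactly linesOf
lemma splitOn_go_linesOf :
    ∀ (fuel : Nat) (l cur : List Char) (acc : List (List Char)), l.length < fuel →
      PySem.Chars.splitOn.go ['\n'] fuel l cur acc
        = acc.reverse ++ mapHead (cur.reverse ++ ·) (linesOf l) := by
  intro fuel
  induction fuel with
  | zero => intro l cur acc h; omega
  | succ n ih =>
      intro l cur acc h
      cases l with
      | nil =>
          have hgo : PySem.Chars.splitOn.go ['\n'] (n + 1) [] cur acc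
              = (cur.reverse :: acc).reverse := rfl
          rw [hgo, linesOf_none [] (by simp)]
          simp [mapHead]
      | cons c rest =>
          have hgo : PySem.Chars.splitOn.go ['\n'] (n + 1) (c :: rest) cur acc
              = (if ['\n'].isPrefixOf (c :: rest) then
                  PySem.Chars.splitOn.go ['\n'] n (List.drop 1 (c :: rest)) [] (cur.reverse :: acc)
                 else PySem.Chars.splitOn.go ['\n'] n rest (c :: cur) acc) := rfl
          rw [hgo, linesOf_cons]
          by_cases hc : c = '\n'
          · have hp : ['\n'].isPrefixOf (c :: rest) = true := by simp [hc, List.isPrefixOf]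
            rw [if_pos hp, if_pos hc]
            rw [List.drop_one, List.tail_cons]
            rw [ih rest [] (cur.reverse :: acc) (by simp at h; omega)]
            obtain ⟨t, ts, ht⟩ := exists_cons_linesOf rest
            simp [ht, mapHead]
          · have hp : ¬ (['\n'].isPrefixOf (c :: rest) = true) := by
              simp [List.isPrefixOf]
              exact fun hx => hc hx.symm
            rw [if_neg hp, if_neg hc]
            rw [ih rest (c :: cur) acc (by simp at h; omega)]
            obtain ⟨t, ts, ht⟩ := exists_cons_linesOf rest
            simp [ht, mapHead]

lemma splitOn_eq_linesOf (s : List Char) :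
    PySem.Chars.splitOn s ['\n'] = linesOf s := by
  unfold PySem.Chars.splitOn
  rw [splitOn_go_linesOf (s.length + 1) s [] [] (by omega)]
  obtain ⟨t, ts, ht⟩ := exists_cons_linesOf s
  simp [ht, mapHead]

-- pvScanB only shifts its offset through
lemma scanB_shift : ∀ (n : Nat) (s : List Char), s.length ≤ n → ∀ (off : Nat),
    pvScanB s off = (pvScanB s 0).map (fun e => off + e) := by
  intro n
  induction n with
  | zero =>
      intro s hs off
      have : s = [] := List.eq_nil_of_length_eq_zero (by omega)
      subst this
      rw [pvScanB, pvScanB]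
      simp [PySem.Chars.find, PySem.Chars.find.go]
  | succ m ih =>
      intro s hs off
      rw [pvScanB, pvScanB]
      simp only
      by_cases hnl : PySem.Chars.find s ['\n'] = -1
      · rw [dif_pos hnl, dif_pos hnl]
        split <;> simp
      · rw [dif_neg hnl, dif_neg hnl]
        have h0 : 0 ≤ PySem.Chars.find s ['\n'] := by
          have := PySem.Chars.neg_one_le_find (s := s) (sub := ['\n'])
          omega
        have hpre := (PySem.Chars.find_spec (s := s) (sub := ['\n']) h0).1
        have hlt : (PySem.Chars.find s ['\n']).toNat < s.length := by
          by_contra hge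
          rw [List.drop_eq_nil_of_le (by omega)] at hpre
          exact absurd (List.prefix_nil.mp hpre) (by simp)
        split
        · simp
        · have hlen : (s.drop ((PySem.Chars.find s ['\n']).toNat + 1)).length ≤ m := by
            simp; omega
          rw [ih _ hlen (off + (PySem.Chars.find s ['\n']).toNat + 1),
              ih _ hlen (0 + (PySem.Chars.find s ['\n']).toNat + 1)]
          cases pvScanB (s.drop ((PySem.Chars.find s ['\n']).toNat + 1)) 0 <;> simp <;> omega

-- the crux: B's string-level splice equals A's line-list splice, joined back
lemma join_splice_cons (a t : List Char) (ts : List (List Char)) (j : Nat) :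
    PySem.Chars.join ['\n']
        (List.take (j + 1 + 1) (a :: t :: ts) ++ [pvMockChars] ++ List.drop (j + 1 + 1) (a :: t :: ts))
      = a ++ '\n' :: PySem.Chars.join ['\n']
          (List.take (j + 1) (t :: ts) ++ [pvMockChars] ++ List.drop (j + 1) (t :: ts)) := by
  rw [List.take_succ_cons (i := j + 1), List.drop_succ_cons (i := j + 1),
    List.cons_append, List.cons_append]
  rw [join_cons_ne_nil _ _ (by simp [List.take_succ_cons])]

lemma splice_eq : ∀ (n : Nat) (s : List Char), s.length ≤ n →
    (match pvScanB s 0 with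
     | none => s
     | some e => s.take e ++ '\n' :: (pvMockChars ++ s.drop e))
    = (match (linesOf s).findIdx? pvIsImport with
       | none => s
       | some i => PySem.Chars.join ['\n']
           ((linesOf s).take (i + 1) ++ [pvMockChars] ++ (linesOf s).drop (i + 1))) := by
  intro n
  induction n with
  | zero =>
      intro s hs
      have : s = [] := List.eq_nil_of_length_eq_zero (by omega)
      subst this
      rw [pvScanB, linesOf_none [] (by simp)]
      by_cases hi : pvIsImport [] = true
      · simp [hi, PySem.Chars.find, PySem.Chars.find.go, List.findIdx?_cons,
          PySem.Chars.join, List.intercalate]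
      · simp [hi, PySem.Chars.find, PySem.Chars.find.go, List.findIdx?_cons]
  | succ m ih =>
      intro s hs
      rw [pvScanB]
      simp only
      rw [find_newline_eq s]
      cases hfn : s.findIdx? (fun c => c == '\n') with
      | none =>
          -- no newline: one single line
          rw [linesOf_none s hfn]
          simp only [dif_pos]
          rw [List.findIdx?_cons]
          by_cases hi : pvIsImport s = true
          · simp only [hi, if_true, Nat.zero_add]
            simp [PySem.Chars.join, List.intercalate]
          · simp [hi]
      | some k =>
          have hlt := find_newline_lt s k hfn
          have hck := getElem_of_findIdx_newline s k hfn hlt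
          have hknat : ((k : Int)).toNat = k := by omega
          have hne : ¬ ((k : Int) = (-1 : Int)) := by omega
          rw [dif_neg hne]
          rw [linesOf_some s k hfn]
          rw [List.findIdx?_cons]
          simp only [hknat]
          have hdropk : s.drop k = '\n' :: s.drop (k + 1) := by
            rw [List.drop_eq_getElem_cons hlt, hck]
          obtain ⟨t, ts, ht⟩ := exists_cons_linesOf (s.drop (k + 1))
          by_cases hi : pvIsImport (s.take k) = true
          · -- the first line is an import line: both splice right after it
            simp only [hi, if_true, Nat.zero_add]
            rw [ht]
            rw [show List.take 1 (s.take k :: t :: ts) = [s.take k] by simp]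
            rw [show List.drop 1 (s.take k :: t :: ts) = t :: ts by simp]
            simp only [List.cons_append, List.nil_append]
            rw [join_cons_ne_nil _ _ (by simp), join_cons_ne_nil _ _ (by simp)]
            rw [← ht, join_linesOf, hdropk]
          · -- not an import line: recurse on the rest of the string
            simp only [hi, if_false, Bool.false_eq_true]
            rw [scanB_shift (s.length) _ (by simp) (0 + k + 1)]
            have ihr := ih (s.drop (k + 1)) (by simp; omega)
            have htake : ∀ e' : Nat, s.take (k + 1 + e') =
                s.take k ++ '\n' :: (s.drop (k + 1)).take e' := by
              intro e'
              rw [List.take_add, List.take_add]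
              rw [List.take_one_drop_eq_of_lt_length hlt]
              simp [List.get_eq_getElem, hck]
            cases hr : pvScanB (s.drop (k + 1)) 0 with
            | none =>
                rw [hr] at ihr
                simp only [Option.map_none]
                cases hL : (linesOf (s.drop (k + 1))).findIdx? pvIsImport with
                | none =>
                    rw [hL] at ihr
                    simp
                | some j =>
                    rw [hL] at ihr
                    simp only at ihr
                    simp only [Option.map_some]
                    rw [ht, join_splice_cons, ← ht, ← ihr]
                    conv_lhs => rw [← List.take_append_drop k s, hdropk]
            | some e' =>
                rw [hr] at ihr
                simp only at ihr
                simp only [Option.map_some]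
                have hsplit : s.take (0 + k + 1 + e') ++ '\n' ::
                    (pvMockChars ++ s.drop (0 + k + 1 + e'))
                    = s.take k ++ '\n' :: ((s.drop (k + 1)).take e' ++ '\n' ::
                        (pvMockChars ++ (s.drop (k + 1)).drop e')) := by
                  have h1 : 0 + k + 1 + e' = k + 1 + e' := by omega
                  rw [h1, htake e', List.drop_drop]
                  simp
                rw [hsplit]
                cases hL : (linesOf (s.drop (k + 1))).findIdx? pvIsImport with
                | none =>
                    rw [hL] at ihr
                    simp only [Option.map_none]
                    rw [ihr]
                    conv_rhs => rw [← List.take_append_drop k s, hdropk]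
                | some j =>
                    rw [hL] at ihr
                    simp only at ihr
                    simp only [Option.map_some]
                    rw [ihr, ht, join_splice_cons]

-- once the flag is true, A's loop just copies the remaining lines
lemma foldA_true (L : List (List Char)) :
    ∀ (l : List (List Char)) (k : Int) (acc : List (List Char)),
      (PySem.List.enumerate l k).foldl (pvBodyA L) (acc, true) = (acc ++ l, true) := by
  intro l
  induction l with
  | nil => intro k acc; simp [PySem.List.enumerate_nil]
  | cons x xs ih =>
      intro k acc
      rw [PySem.List.enumerate_cons]
      simp only [List.foldl_cons]
      have hb : pvBodyA L (acc, true) (k, x) = (acc ++ [x], true) := by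
        simp [pvBodyA]
      rw [hb, ih]
      simp

-- characterisation of A's loop: it splices the mock after the first import line
lemma foldA_main (L : List (List Char)) :
    ∀ (l : List (List Char)) (k : Int) (acc : List (List Char)),
      (PySem.List.enumerate l k).foldl (pvBodyA L) (acc, false)
        = match l.findIdx? pvIsImport with
          | none => (acc ++ l, false)
          | some i => (acc ++ l.take (i + 1) ++ [pvMockChars] ++ l.drop (i + 1), true) := by
  intro l
  induction l with
  | nil => intro k acc; simp [PySem.List.enumerate_nil]
  | cons x xs ih =>
      intro k acc
      rw [PySem.List.enumerate_cons]
      simp only [List.foldl_cons]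
      rw [List.findIdx?_cons]
      by_cases hp : pvIsImport x = true
      · have hb : pvBodyA L (acc, false) (k, x) = (acc ++ [x] ++ [pvMockChars], true) := by
          simp [pvBodyA, hp]
        rw [hb, foldA_true]
        simp [hp]
      · have hb : pvBodyA L (acc, false) (k, x) = (acc ++ [x], false) := by
          simp [pvBodyA, hp]
        rw [hb, ih]
        cases hfi : xs.findIdx? pvIsImport with
        | none => simp [hp]
        | some j => simp [hp, List.take_succ_cons, List.drop_succ_cons]

-- ===== VERDICT (by name: the statement is the Claim_ definition above) =====
theorem add_pinia_mocks_spec : Claim_equal_add_pinia_mocks := by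
  intro content _
  unfold Spec_add_pinia_mocks add_pinia_mocks add_pinia_mocks_alt
  cases h1 : (PySem.Str.isIn "useAppStore" content || PySem.Str.isIn "useUserStore" content) with
  | false => simp
  | true =>
      cases h2 : PySem.Str.isIn "vi.mock('@/stores" content with
      | true => simp
      | false =>
          simp only [Bool.not_false, Bool.and_true, if_true]
          rw [foldA_main]
          have hsep : String.toList "\n" = ['\n'] := by decide
          rw [hsep, splitOn_eq_linesOf]
          have key := splice_eq (content.toList.length) content.toList (le_refl _)
          cases hfi : (linesOf content.toList).findIdx? pvIsImport with
          | none =>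
              rw [hfi] at key
              simp only at key
              simp only
              rw [List.nil_append, join_linesOf]
              cases hs : pvScanB content.toList 0 with
              | none => simp
              | some e =>
                  rw [hs] at key
                  simp only at key
                  show String.ofList content.toList
                      = String.ofList (content.toList.take e
                          ++ '\n' :: (pvMockChars ++ content.toList.drop e))
                  rw [key]
          | some i =>
              rw [hfi] at key
              simp only at key
              simp only [List.nil_append]
              cases hs : pvScanB content.toList 0 with
              | none =>
                  rw [hs] at key
                  simp only at key
                  rw [← key]
                  simp
              | some e =>
                  rw [hs] at key
                  simp only at key
                  show String.ofList (PySem.Chars.join ['\n']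
                        ((linesOf content.toList).take (i + 1) ++ [pvMockChars]
                          ++ (linesOf content.toList).drop (i + 1)))
                      = String.ofList (content.toList.take e
                          ++ '\n' :: (pvMockChars ++ content.toList.drop e))
                  rw [key]
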